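-- pv_equiv track=rewrite | github.com/Dombrovo/pygame_tactics_test | testing/test_terrain_generation.py | visualize_terrain
-- ===== SOURCE A (Python) =====
-- def visualize_terrain(terrain_data, grid_size=10):
--     """
--     Visualize terrain layout using ASCII art.
--
--     Args:
--         terrain_data: List of (x, y, cover_type) tuples
--         grid_size: Size of the grid (default 10)
--
--     Returns:
--         String representation of the terrain
--     """
--     # Create empty grid
--     grid = [["." for _ in range(grid_size)] for _ in range(grid_size)]
--
--     # Place terrain
--     for x, y, cover_type in terrain_data:
--         if 0 <= x < grid_size and 0 <= y < grid_size:
--             if cover_type == "full_cover":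
--                 grid[y][x] = "#"  # Full cover
--             elif cover_type == "half_cover":
--                 grid[y][x] = ":"  # Half cover
--
--     # Mark spawn zones
--     # Player spawns: left side (x < 3)
--     # Enemy spawns: right side (x > 6)
--     for y in range(grid_size):
--         for x in range(grid_size):
--             if grid[y][x] == ".":  # Only mark empty tiles
--                 if x < 3:
--                     grid[y][x] = "P"  # Player spawn zone
--                 elif x > 6:
--                     grid[y][x] = "E"  # Enemy spawn zone
--
--     # Convert to string
--     lines = []
--     lines.append("  " + "".join(str(i) for i in range(grid_size)))
--     lines.append("  " + "-" * grid_size)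
--     for y, row in enumerate(grid):
--         lines.append(f"{y}|" + "".join(row))
--
--     return "\n".join(lines)
-- ===== SOURCE B (Python) =====
-- def visualize_terrain(terrain_data, grid_size=10):
--     """Start from a closed-form background row built by string repetition
--     (spawn zones included from the outset), then splice terrain characters
--     into the row strings; no 2D cell grid and no spawn-marking sweep."""
--     n = grid_size
--     bg = "P" * min(3, n) + "." * (min(7, n) - 3) + "E" * (n - 7)
--     rows = [bg] * n
--     for x, y, t in terrain_data:
--         if 0 <= x < n and 0 <= y < n and t in ("full_cover", "half_cover"):
--             c = "#" if t == "full_cover" else ":"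
--             rows[y] = rows[y][:x] + c + rows[y][x + 1:]
--     lines = ["  " + "".join(str(i) for i in range(n)), "  " + "-" * n]
--     lines.extend(f"{y}|{r}" for y, r in enumerate(rows))
--     return "\n".join(lines)
-- ===== Notes on version B (the rewrite author's own statement) =====
-- stated objective: faster
-- what changed: Instead of A's mutable 2D cell grid with a terrain-placement sweep, a second whole-grid per-cell spawn-marking sweep and a join-per-row render pass, B builds the spawn-zone background row once in closed form by string repetition ('P'*min(3,n)+'.'*(min(7,n)-3)+'E'*(n-7)), replicates it, and splices terrain characters directly into the row strings; the per-cell spawn sweep and per-cell joins disappear into C-level string operations.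
import Mathlib
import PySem

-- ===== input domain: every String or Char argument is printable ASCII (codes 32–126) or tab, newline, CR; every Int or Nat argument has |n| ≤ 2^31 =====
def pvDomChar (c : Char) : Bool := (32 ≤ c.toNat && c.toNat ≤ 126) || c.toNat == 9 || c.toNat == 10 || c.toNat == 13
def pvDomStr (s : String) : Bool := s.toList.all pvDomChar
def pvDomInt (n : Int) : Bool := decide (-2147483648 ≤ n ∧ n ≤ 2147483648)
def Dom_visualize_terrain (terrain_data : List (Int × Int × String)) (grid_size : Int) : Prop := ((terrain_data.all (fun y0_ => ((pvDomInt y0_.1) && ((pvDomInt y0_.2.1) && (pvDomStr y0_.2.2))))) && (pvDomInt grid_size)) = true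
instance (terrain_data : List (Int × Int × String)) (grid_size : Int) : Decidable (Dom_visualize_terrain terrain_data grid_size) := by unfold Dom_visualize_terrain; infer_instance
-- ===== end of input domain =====

-- B builds the spawn-zone background row once in closed form by string repetition and
-- splices terrain characters into the row strings, eliminating A's 2D cell grid and its
-- whole-grid spawn-marking sweep (objective: alternative decomposition).
-- Python one-character strings held in A's grid cells are modelled as Char (PySem.Chars convention).

-- ===== PORT A =====
-- grid[y][x] = v  (indices are in range whenever A executes this)
def vtSet (grid : List (List Char)) (y x : Int) (v : Char) : List (List Char) :=
  PySem.List.pySetD grid y (PySem.List.pySetD (PySem.List.pyGetD grid y []) x v)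

def visualize_terrain (terrain_data : List (Int × Int × String)) (grid_size : Int) : String :=
  let grid0 := (PySem.List.pyRange 0 grid_size 1).map
      (fun _ => (PySem.List.pyRange 0 grid_size 1).map (fun _ => '.'))
  let grid1 := terrain_data.foldl (fun grid e =>
      if 0 ≤ e.1 ∧ e.1 < grid_size ∧ 0 ≤ e.2.1 ∧ e.2.1 < grid_size then
        if e.2.2 = "full_cover" then vtSet grid e.2.1 e.1 '#'
        else if e.2.2 = "half_cover" then vtSet grid e.2.1 e.1 ':'
        else grid
      else grid) grid0
  let grid2 := (PySem.List.pyRange 0 grid_size 1).foldl (fun grid y =>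
      (PySem.List.pyRange 0 grid_size 1).foldl (fun grid x =>
        if PySem.List.pyGetD (PySem.List.pyGetD grid y []) x '*' = '.' then
          if x < 3 then vtSet grid y x 'P'
          else if x > 6 then vtSet grid y x 'E'
          else grid
        else grid) grid) grid1
  let lines := ("  " ++ PySem.Str.join "" ((PySem.List.pyRange 0 grid_size 1).map PySem.Int.toStr))
    :: ("  " ++ String.ofList (PySem.List.pyRepeat ['-'] grid_size))
    :: (PySem.List.enumerate grid2 0).map (fun p => PySem.Int.toStr p.1 ++ "|" ++ String.ofList p.2)
  PySem.Str.join "\n" lines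

-- ===== PORT B =====
-- "P" * min(3, n) + "." * (min(7, n) - 3) + "E" * (n - 7)
def vtBg (g : Int) : List Char :=
  PySem.List.pyRepeat ['P'] (min 3 g) ++ PySem.List.pyRepeat ['.'] (min 7 g - 3)
    ++ PySem.List.pyRepeat ['E'] (g - 7)

-- rows[y] = rows[y][:x] + c + rows[y][x+1:]
def vtSplice (rows : List (List Char)) (y x : Int) (c : Char) : List (List Char) :=
  PySem.List.pySetD rows y
    (PySem.List.slice (PySem.List.pyGetD rows y []) none (some x) ++ [c]
      ++ PySem.List.slice (PySem.List.pyGetD rows y []) (some (x + 1)) none)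

def visualize_terrain_alt (terrain_data : List (Int × Int × String)) (grid_size : Int) : String :=
  let rows0 := PySem.List.pyRepeat [vtBg grid_size] grid_size
  let rows := terrain_data.foldl (fun rows e =>
      if 0 ≤ e.1 ∧ e.1 < grid_size ∧ 0 ≤ e.2.1 ∧ e.2.1 < grid_size ∧
          (e.2.2 = "full_cover" ∨ e.2.2 = "half_cover") then
        vtSplice rows e.2.1 e.1 (if e.2.2 = "full_cover" then '#' else ':')
      else rows) rows0
  let lines := ("  " ++ PySem.Str.join "" ((PySem.List.pyRange 0 grid_size 1).map PySem.Int.toStr))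
    :: ("  " ++ String.ofList (PySem.List.pyRepeat ['-'] grid_size))
    :: (PySem.List.enumerate rows 0).map (fun p => PySem.Int.toStr p.1 ++ "|" ++ String.ofList p.2)
  PySem.Str.join "\n" lines

-- ===== PRECONDITION & SPEC =====
def Spec_visualize_terrain (terrain_data : List (Int × Int × String)) (grid_size : Int) (out : String) : Prop := out = visualize_terrain_alt terrain_data grid_size
instance (terrain_data : List (Int × Int × String)) (grid_size : Int) (out : String) : Decidable (Spec_visualize_terrain terrain_data grid_size out) := by unfold Spec_visualize_terrain; infer_instance

-- ===== CLAIM (what is proved, stated in full; the proofs are below) =====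
def Claim_equal_visualize_terrain : Prop := ∀ (terrain_data : List (Int × Int × String)) (grid_size : Int), Dom_visualize_terrain terrain_data grid_size → Spec_visualize_terrain terrain_data grid_size (visualize_terrain terrain_data grid_size)

-- ===== LEMMAS AND PROOFS =====
-- cell (j = row, i = column); defaults are never reached on in-range indices
def vtCellAt (grid : List (List Char)) (j i : Nat) : Char := (grid.getD j []).getD i '*'

def vtWf (n : Nat) (grid : List (List Char)) : Prop :=
  grid.length = n ∧ ∀ row ∈ grid, row.length = n

-- ghost overlay dict shared by both inductions
def vtOverlay (g : Int) (td : List (Int × Int × String)) : PySem.Dict (Int × Int) Char :=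
  td.foldl (fun d e =>
    if 0 ≤ e.1 ∧ e.1 < g ∧ 0 ≤ e.2.1 ∧ e.2.1 < g then
      if e.2.2 = "full_cover" then d.insert (e.1, e.2.1) '#'
      else if e.2.2 = "half_cover" then d.insert (e.1, e.2.1) ':'
      else d
    else d) PySem.Dict.empty

def vtRelA (n : Nat) (grid : List (List Char)) (d : PySem.Dict (Int × Int) Char) : Prop :=
  ∀ j i : Nat, j < n → i < n → vtCellAt grid j i = ((d.get? ((i : Int), (j : Int))).getD '.')

def vtGood (d : PySem.Dict (Int × Int) Char) : Prop :=
  ∀ k v, d.get? k = some v → v = '#' ∨ v = ':'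

def spawnFix (x : Int) (c : Char) : Char :=
  if c = '.' then (if x < 3 then 'P' else if x > 6 then 'E' else '.') else c

def vtBgChar (x : Int) : Char := if x < 3 then 'P' else if x > 6 then 'E' else '.'

def vtRelB (n : Nat) (rows : List (List Char)) (d : PySem.Dict (Int × Int) Char) : Prop :=
  ∀ j i : Nat, j < n → i < n → vtCellAt rows j i = ((d.get? ((i : Int), (j : Int))).getD (vtBgChar i))

theorem spawnFix_idem (x : Int) (c : Char) : spawnFix x (spawnFix x c) = spawnFix x c := by
  unfold spawnFix; split_ifs <;> simp_all

theorem vtSet_spec {n : Nat} {grid : List (List Char)} (hwf : vtWf n grid)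
    {y x : Int} (v : Char) (hy0 : 0 ≤ y) (hyn : y.toNat < n) (hx0 : 0 ≤ x) (hxn : x.toNat < n) :
    vtWf n (vtSet grid y x v) ∧
      ∀ j i : Nat, vtCellAt (vtSet grid y x v) j i =
        if j = y.toNat ∧ i = x.toNat then v else vtCellAt grid j i := by
  obtain ⟨hlen, hrow⟩ := hwf
  have hjlt : y.toNat < grid.length := by omega
  have hrowmem : grid.getD y.toNat [] ∈ grid := by
    rw [List.getD_eq_getElem?_getD, List.getElem?_eq_getElem hjlt, Option.getD_some]
    exact List.getElem_mem hjlt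
  have hrowlen : (grid.getD y.toNat []).length = n := hrow _ hrowmem
  have hrowlen2 : (grid[y.toNat]'hjlt).length = n := hrow _ (List.getElem_mem hjlt)
  have hvt : vtSet grid y x v = grid.set y.toNat ((grid.getD y.toNat []).set x.toNat v) := by
    unfold vtSet
    rw [show x = (x.toNat : Int) from (Int.toNat_of_nonneg hx0).symm,
        show y = (y.toNat : Int) from (Int.toNat_of_nonneg hy0).symm]
    simp only [PySem.List.pySetD_natCast, PySem.List.pyGetD_natCast, Int.toNat_natCast]
  rw [hvt]
  refine ⟨⟨by simpa using hlen, ?_⟩, ?_⟩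
  · intro row hmem
    rcases List.mem_or_eq_of_mem_set hmem with h | h
    · exact hrow row h
    · subst h; simpa using hrowlen
  · intro j i
    unfold vtCellAt
    by_cases hj : j = y.toNat
    · subst hj
      by_cases hi : i = x.toNat
      · subst hi
        simp [List.getD_eq_getElem?_getD, hjlt, hrowlen2, hxn]
      · simp [List.getD_eq_getElem?_getD, hjlt, hi, Ne.symm hi]
    · simp [List.getD_eq_getElem?_getD, hj, Ne.symm hj]

theorem vtSplice_eq_vtSet {n : Nat} {rows : List (List Char)} (hwf : vtWf n rows)
    {y x : Int} (c : Char) (hy0 : 0 ≤ y) (hyn : y.toNat < n) (hx0 : 0 ≤ x) (hxn : x.toNat < n) :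
    vtSplice rows y x c = vtSet rows y x c := by
  obtain ⟨hlen, hrow⟩ := hwf
  have hjlt : y.toNat < rows.length := by omega
  have hrowmem : rows.getD y.toNat [] ∈ rows := by
    rw [List.getD_eq_getElem?_getD, List.getElem?_eq_getElem hjlt, Option.getD_some]
    exact List.getElem_mem hjlt
  have hrowlen : (rows.getD y.toNat []).length = n := hrow _ hrowmem
  unfold vtSplice vtSet
  congr 1
  have hget : PySem.List.pyGetD rows y [] = rows.getD y.toNat [] := by
    rw [show y = (y.toNat : Int) from (Int.toNat_of_nonneg hy0).symm]
    simp only [PySem.List.pyGetD_natCast, Int.toNat_natCast]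
  rw [hget, PySem.List.slice_to _ hx0, PySem.List.slice_from _ (by omega),
      show x = (x.toNat : Int) from (Int.toNat_of_nonneg hx0).symm,
      PySem.List.pySetD_natCast, show ((x.toNat : Int) + 1).toNat = x.toNat + 1 from by omega,
      Int.toNat_natCast, List.set_eq_take_append_cons_drop, if_pos (by omega)]
  simp

theorem place_inv (g : Int) (n : Nat) (hn : n = g.toNat)
    (td : List (Int × Int × String)) :
    ∀ (grid : List (List Char)) (d : PySem.Dict (Int × Int) Char),
      vtWf n grid → vtRelA n grid d → vtGood d →
      vtWf n (td.foldl (fun grid e =>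
          if 0 ≤ e.1 ∧ e.1 < g ∧ 0 ≤ e.2.1 ∧ e.2.1 < g then
            if e.2.2 = "full_cover" then vtSet grid e.2.1 e.1 '#'
            else if e.2.2 = "half_cover" then vtSet grid e.2.1 e.1 ':'
            else grid
          else grid) grid) ∧
      vtRelA n (td.foldl (fun grid e =>
          if 0 ≤ e.1 ∧ e.1 < g ∧ 0 ≤ e.2.1 ∧ e.2.1 < g then
            if e.2.2 = "full_cover" then vtSet grid e.2.1 e.1 '#'
            else if e.2.2 = "half_cover" then vtSet grid e.2.1 e.1 ':'
            else grid
          else grid) grid)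
        (td.foldl (fun d e =>
          if 0 ≤ e.1 ∧ e.1 < g ∧ 0 ≤ e.2.1 ∧ e.2.1 < g then
            if e.2.2 = "full_cover" then d.insert (e.1, e.2.1) '#'
            else if e.2.2 = "half_cover" then d.insert (e.1, e.2.1) ':'
            else d
          else d) d) ∧
      vtGood (td.foldl (fun d e =>
          if 0 ≤ e.1 ∧ e.1 < g ∧ 0 ≤ e.2.1 ∧ e.2.1 < g then
            if e.2.2 = "full_cover" then d.insert (e.1, e.2.1) '#'
            else if e.2.2 = "half_cover" then d.insert (e.1, e.2.1) ':'
            else d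
          else d) d) := by
  induction td with
  | nil => intro grid d hwf hrel hgood; exact ⟨hwf, hrel, hgood⟩
  | cons e rest ih =>
    intro grid d hwf hrel hgood
    simp only [List.foldl_cons]
    obtain ⟨x, y, c⟩ := e
    by_cases hb : 0 ≤ x ∧ x < g ∧ 0 ≤ y ∧ y < g
    · obtain ⟨hx0, hxg, hy0, hyg⟩ := id hb
      have hxn : x.toNat < n := by omega
      have hyn : y.toNat < n := by omega
      have key : ∀ (v : Char), (v = '#' ∨ v = ':') →
          vtWf n (vtSet grid y x v) ∧ vtRelA n (vtSet grid y x v) (d.insert (x, y) v) ∧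
            vtGood (d.insert (x, y) v) := by
        intro v hv
        obtain ⟨hwf', hcell⟩ := vtSet_spec ⟨hwf.1, hwf.2⟩ v hy0 hyn hx0 hxn
        refine ⟨hwf', ?_, ?_⟩
        · intro j i hj hi
          rw [hcell j i, PySem.Dict.get?_insert]
          have hiff : (j = y.toNat ∧ i = x.toNat) ↔ (((i : Int), (j : Int)) = (x, y)) := by
            simp only [Prod.mk.injEq]
            omega
          by_cases hji : j = y.toNat ∧ i = x.toNat
          · rw [if_pos hji, if_pos (hiff.mp hji)]
            simp
          · rw [if_neg hji, if_neg (fun h => hji (hiff.mpr h))]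
            exact hrel j i hj hi
        · intro k w hw
          rw [PySem.Dict.get?_insert] at hw
          by_cases hk : k = (x, y)
          · rw [if_pos hk] at hw; cases hw; exact hv
          · rw [if_neg hk] at hw; exact hgood k w hw
      by_cases hc1 : c = "full_cover"
      · simpa [hb, hx0, hxg, hy0, hyg, hc1] using
          ih _ _ (key '#' (Or.inl rfl)).1 (key '#' (Or.inl rfl)).2.1 (key '#' (Or.inl rfl)).2.2
      · by_cases hc2 : c = "half_cover"
        · simpa [hb, hx0, hxg, hy0, hyg, hc1, hc2] using
            ih _ _ (key ':' (Or.inr rfl)).1 (key ':' (Or.inr rfl)).2.1 (key ':' (Or.inr rfl)).2.2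
        · simpa [hb, hx0, hxg, hy0, hyg, hc1, hc2] using ih _ _ hwf hrel hgood
    · simpa [hb] using ih _ _ hwf hrel hgood

theorem splice_inv (g : Int) (n : Nat) (hn : n = g.toNat)
    (td : List (Int × Int × String)) :
    ∀ (rows : List (List Char)) (d : PySem.Dict (Int × Int) Char),
      vtWf n rows → vtRelB n rows d →
      vtWf n (td.foldl (fun rows e =>
          if 0 ≤ e.1 ∧ e.1 < g ∧ 0 ≤ e.2.1 ∧ e.2.1 < g ∧
              (e.2.2 = "full_cover" ∨ e.2.2 = "half_cover") then
            vtSplice rows e.2.1 e.1 (if e.2.2 = "full_cover" then '#' else ':')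
          else rows) rows) ∧
      vtRelB n (td.foldl (fun rows e =>
          if 0 ≤ e.1 ∧ e.1 < g ∧ 0 ≤ e.2.1 ∧ e.2.1 < g ∧
              (e.2.2 = "full_cover" ∨ e.2.2 = "half_cover") then
            vtSplice rows e.2.1 e.1 (if e.2.2 = "full_cover" then '#' else ':')
          else rows) rows)
        (td.foldl (fun d e =>
          if 0 ≤ e.1 ∧ e.1 < g ∧ 0 ≤ e.2.1 ∧ e.2.1 < g then
            if e.2.2 = "full_cover" then d.insert (e.1, e.2.1) '#'
            else if e.2.2 = "half_cover" then d.insert (e.1, e.2.1) ':'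
            else d
          else d) d) := by
  induction td with
  | nil => intro rows d hwf hrel; exact ⟨hwf, hrel⟩
  | cons e rest ih =>
    intro rows d hwf hrel
    simp only [List.foldl_cons]
    obtain ⟨x, y, c⟩ := e
    by_cases hb : 0 ≤ x ∧ x < g ∧ 0 ≤ y ∧ y < g
    · obtain ⟨hx0, hxg, hy0, hyg⟩ := id hb
      have hxn : x.toNat < n := by omega
      have hyn : y.toNat < n := by omega
      have key : ∀ (v : Char),
          vtWf n (vtSplice rows y x v) ∧
            vtRelB n (vtSplice rows y x v) (d.insert (x, y) v) := by
        intro v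
        rw [vtSplice_eq_vtSet hwf v hy0 hyn hx0 hxn]
        obtain ⟨hwf', hcell⟩ := vtSet_spec hwf v hy0 hyn hx0 hxn
        refine ⟨hwf', ?_⟩
        intro j i hj hi
        rw [hcell j i, PySem.Dict.get?_insert]
        have hiff : (j = y.toNat ∧ i = x.toNat) ↔ (((i : Int), (j : Int)) = (x, y)) := by
          simp only [Prod.mk.injEq]
          omega
        by_cases hji : j = y.toNat ∧ i = x.toNat
        · rw [if_pos hji, if_pos (hiff.mp hji)]
          simp
        · rw [if_neg hji, if_neg (fun h => hji (hiff.mpr h))]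
          exact hrel j i hj hi
      by_cases hc1 : c = "full_cover"
      · simpa [hb, hx0, hxg, hy0, hyg, hc1] using ih _ _ (key '#').1 (key '#').2
      · by_cases hc2 : c = "half_cover"
        · simpa [hb, hx0, hxg, hy0, hyg, hc1, hc2] using ih _ _ (key ':').1 (key ':').2
        · simpa [hb, hx0, hxg, hy0, hyg, hc1, hc2] using ih _ _ hwf hrel
    · have hb' : ¬ (0 ≤ x ∧ x < g ∧ 0 ≤ y ∧ y < g ∧ (c = "full_cover" ∨ c = "half_cover")) := by
        intro h; exact hb ⟨h.1, h.2.1, h.2.2.1, h.2.2.2.1⟩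
      simpa [hb, hb'] using ih _ _ hwf hrel

theorem grid0_spec (g : Int) (n : Nat) (hn : n = g.toNat) :
    vtWf n ((PySem.List.pyRange 0 g 1).map
        (fun _ => (PySem.List.pyRange 0 g 1).map (fun _ => '.'))) ∧
      vtRelA n ((PySem.List.pyRange 0 g 1).map
        (fun _ => (PySem.List.pyRange 0 g 1).map (fun _ => '.'))) PySem.Dict.empty := by
  have hlen : (PySem.List.pyRange 0 g 1).length = n := by
    rw [PySem.List.length_pyRange_one]; omega
  refine ⟨⟨by simpa using hlen, ?_⟩, ?_⟩
  · intro row hmem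
    rcases List.mem_map.mp hmem with ⟨_, _, rfl⟩
    simpa using hlen
  · intro j i hj hi
    have hj2 : j < g.toNat := by omega
    have hi2 : i < g.toNat := by omega
    unfold vtCellAt
    simp [List.getD_eq_getElem?_getD, hj2, hi2, PySem.Dict.get?_empty]

theorem vtBg_len (g : Int) (hg : 0 ≤ g) : (vtBg g).length = g.toNat := by
  unfold vtBg
  simp only [PySem.List.pyRepeat_singleton, List.length_append, List.length_replicate]
  omega

theorem vtBg_getD (g : Int) (i : Nat) (hi : i < g.toNat) :
    (vtBg g).getD i '*' = vtBgChar (i : Int) := by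
  unfold vtBg vtBgChar
  simp only [PySem.List.pyRepeat_singleton]
  rw [List.getD_eq_getElem?_getD]
  by_cases h1 : i < (min 3 g).toNat
  · rw [List.getElem?_append_left (by simp only [List.length_append, List.length_replicate]; omega),
        List.getElem?_append_left (by simp only [List.length_replicate]; omega),
        List.getElem?_replicate, if_pos h1, Option.getD_some, if_pos (by omega)]
  · by_cases h2 : i < (min 3 g).toNat + (min 7 g - 3).toNat
    · rw [List.getElem?_append_left (by simp only [List.length_append, List.length_replicate]; omega),
          List.getElem?_append_right (by simp only [List.length_replicate]; omega),
          List.getElem?_replicate]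
      simp only [List.length_replicate]
      rw [if_pos (by omega), Option.getD_some, if_neg (by omega), if_neg (by omega)]
    · rw [List.getElem?_append_right (by simp only [List.length_append, List.length_replicate]; omega),
          List.getElem?_replicate]
      simp only [List.length_append, List.length_replicate]
      rw [if_pos (by omega), Option.getD_some, if_neg (by omega), if_pos (by omega)]

theorem rows0_spec (g : Int) (n : Nat) (hn : n = g.toNat) :
    vtWf n (PySem.List.pyRepeat [vtBg g] g) ∧
      vtRelB n (PySem.List.pyRepeat [vtBg g] g) PySem.Dict.empty := by
  rw [PySem.List.pyRepeat_singleton]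
  by_cases hg : 0 ≤ g
  · refine ⟨⟨by simp; omega, ?_⟩, ?_⟩
    · intro row hmem
      rw [List.eq_of_mem_replicate hmem, vtBg_len g hg]; omega
    · intro j i hj hi
      unfold vtCellAt
      have hrow : (List.replicate g.toNat (vtBg g)).getD j [] = vtBg g := by
        rw [List.getD_eq_getElem?_getD, List.getElem?_replicate, if_pos (by omega), Option.getD_some]
      rw [hrow, vtBg_getD g i (by omega), PySem.Dict.get?_empty, Option.getD_none]
  · have h0 : g.toNat = 0 := by omega
    refine ⟨⟨by simp; omega, ?_⟩, ?_⟩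
    · intro row hmem
      rw [h0] at hmem
      simp at hmem
    · intro j i hj hi
      omega

theorem vt_read (grid : List (List Char)) {y x : Int} (hy0 : 0 ≤ y) (hx0 : 0 ≤ x) :
    PySem.List.pyGetD (PySem.List.pyGetD grid y []) x '*' = vtCellAt grid y.toNat x.toNat := by
  unfold vtCellAt
  rw [show x = (x.toNat : Int) from (Int.toNat_of_nonneg hx0).symm,
      show y = (y.toNat : Int) from (Int.toNat_of_nonneg hy0).symm]
  simp only [PySem.List.pyGetD_natCast, Int.toNat_natCast]

theorem sweep_row (g : Int) (n : Nat) (hn : n = g.toNat) (y : Int) (hy0 : 0 ≤ y) (hyn : y.toNat < n)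
    (xs : List Int) :
    ∀ grid, (∀ x ∈ xs, 0 ≤ x ∧ x < g) → vtWf n grid →
      vtWf n (xs.foldl (fun grid x =>
          if PySem.List.pyGetD (PySem.List.pyGetD grid y []) x '*' = '.' then
            if x < 3 then vtSet grid y x 'P'
            else if x > 6 then vtSet grid y x 'E'
            else grid
          else grid) grid) ∧
      ∀ j i : Nat, j < n → i < n →
        vtCellAt (xs.foldl (fun grid x =>
            if PySem.List.pyGetD (PySem.List.pyGetD grid y []) x '*' = '.' then
              if x < 3 then vtSet grid y x 'P'
              else if x > 6 then vtSet grid y x 'E'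
              else grid
            else grid) grid) j i =
          if j = y.toNat ∧ (i : Int) ∈ xs then spawnFix i (vtCellAt grid j i)
          else vtCellAt grid j i := by
  induction xs with
  | nil =>
    intro grid _ hwf
    exact ⟨hwf, by intro j i hj hi; simp⟩
  | cons x rest ih =>
    intro grid hmem hwf
    obtain ⟨hx0, hxg⟩ := hmem x (List.mem_cons_self)
    have hxn : x.toNat < n := by omega
    have hread := vt_read grid hy0 hx0
    have step : vtWf n (if PySem.List.pyGetD (PySem.List.pyGetD grid y []) x '*' = '.' then
            if x < 3 then vtSet grid y x 'P'
            else if x > 6 then vtSet grid y x 'E'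
            else grid
          else grid) ∧
        ∀ j i : Nat, vtCellAt (if PySem.List.pyGetD (PySem.List.pyGetD grid y []) x '*' = '.' then
            if x < 3 then vtSet grid y x 'P'
            else if x > 6 then vtSet grid y x 'E'
            else grid
          else grid) j i =
          if j = y.toNat ∧ i = x.toNat then spawnFix x (vtCellAt grid j i)
          else vtCellAt grid j i := by
      rw [hread]
      by_cases hdot : vtCellAt grid y.toNat x.toNat = '.'
      · rw [if_pos hdot]
        by_cases h3 : x < 3
        · rw [if_pos h3]
          obtain ⟨hwf', hcell'⟩ := vtSet_spec hwf 'P' hy0 hyn hx0 hxn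
          refine ⟨hwf', ?_⟩
          intro j i
          rw [hcell' j i]
          by_cases hji : j = y.toNat ∧ i = x.toNat
          · rw [if_pos hji, if_pos hji, hji.1, hji.2, hdot]
            simp [spawnFix, h3]
          · rw [if_neg hji, if_neg hji]
        · rw [if_neg h3]
          by_cases h6 : x > 6
          · rw [if_pos h6]
            obtain ⟨hwf', hcell'⟩ := vtSet_spec hwf 'E' hy0 hyn hx0 hxn
            refine ⟨hwf', ?_⟩
            intro j i
            rw [hcell' j i]
            by_cases hji : j = y.toNat ∧ i = x.toNat
            · rw [if_pos hji, if_pos hji, hji.1, hji.2, hdot]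
              simp [spawnFix, h3, h6]
            · rw [if_neg hji, if_neg hji]
          · rw [if_neg h6]
            refine ⟨hwf, ?_⟩
            intro j i
            by_cases hji : j = y.toNat ∧ i = x.toNat
            · rw [if_pos hji, hji.1, hji.2, hdot]
              simp [spawnFix, h3, h6]
            · rw [if_neg hji]
      · rw [if_neg hdot]
        refine ⟨hwf, ?_⟩
        intro j i
        by_cases hji : j = y.toNat ∧ i = x.toNat
        · rw [if_pos hji, hji.1, hji.2]
          unfold spawnFix
          rw [if_neg hdot]
        · rw [if_neg hji]
    obtain ⟨hwf', hcell'⟩ := step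
    obtain ⟨hwfF, hcellF⟩ := ih _ (fun z hz => hmem z (List.mem_cons_of_mem _ hz)) hwf'
    refine ⟨by simpa using hwfF, ?_⟩
    intro j i hj hi
    simp only [List.foldl_cons]
    rw [hcellF j i hj hi, hcell' j i]
    have hix : (i = x.toNat) ↔ ((i : Int) = x) := by omega
    by_cases hj1 : j = y.toNat
    · by_cases h2 : (i : Int) = x
      · subst h2
        have hixt : i = ((i : Int)).toNat := by omega
        by_cases h3 : (i : Int) ∈ rest
        · simp [hj1, h3, ← hixt, spawnFix_idem]
        · simp [hj1, h3, ← hixt]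
      · have hix' : ¬ (i = x.toNat) := fun h => h2 (hix.mp h)
        by_cases h3 : (i : Int) ∈ rest
        · simp [hj1, h2, h3, hix']
        · simp [hj1, h2, h3, hix']
    · simp [hj1]

theorem sweep_all (g : Int) (n : Nat) (hn : n = g.toNat) (ys : List Int) :
    ∀ grid, (∀ y ∈ ys, 0 ≤ y ∧ y < g) → vtWf n grid →
      vtWf n (ys.foldl (fun grid y =>
          (PySem.List.pyRange 0 g 1).foldl (fun grid x =>
            if PySem.List.pyGetD (PySem.List.pyGetD grid y []) x '*' = '.' then
              if x < 3 then vtSet grid y x 'P'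
              else if x > 6 then vtSet grid y x 'E'
              else grid
            else grid) grid) grid) ∧
      ∀ j i : Nat, j < n → i < n →
        vtCellAt (ys.foldl (fun grid y =>
            (PySem.List.pyRange 0 g 1).foldl (fun grid x =>
              if PySem.List.pyGetD (PySem.List.pyGetD grid y []) x '*' = '.' then
                if x < 3 then vtSet grid y x 'P'
                else if x > 6 then vtSet grid y x 'E'
                else grid
              else grid) grid) grid) j i =
          if (j : Int) ∈ ys then spawnFix i (vtCellAt grid j i) else vtCellAt grid j i := by
  induction ys with
  | nil =>
    intro grid _ hwf
    exact ⟨hwf, by intro j i hj hi; simp⟩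
  | cons y rest ih =>
    intro grid hmem hwf
    obtain ⟨hy0, hyg⟩ := hmem y (List.mem_cons_self)
    have hyn : y.toNat < n := by omega
    obtain ⟨hwf', hcell'⟩ := sweep_row g n hn y hy0 hyn (PySem.List.pyRange 0 g 1) grid
      (fun x hx => PySem.List.mem_pyRange_one.mp hx) hwf
    obtain ⟨hwfF, hcellF⟩ := ih _ (fun z hz => hmem z (List.mem_cons_of_mem _ hz)) hwf'
    refine ⟨by simpa using hwfF, ?_⟩
    intro j i hj hi
    simp only [List.foldl_cons]
    rw [hcellF j i hj hi, hcell' j i hj hi]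
    have hirange : (i : Int) ∈ PySem.List.pyRange 0 g 1 := by
      rw [PySem.List.mem_pyRange_one]; omega
    have hjy : (j = y.toNat) ↔ ((j : Int) = y) := by omega
    by_cases h2 : (j : Int) = y
    · subst h2
      have hjt : j = ((j : Int)).toNat := by omega
      by_cases h3 : (j : Int) ∈ rest
      · simp [h3, hirange, ← hjt, spawnFix_idem]
      · simp [h3, hirange, ← hjt]
    · have hjy' : ¬ (j = y.toNat) := fun h => h2 (hjy.mp h)
      by_cases h3 : (j : Int) ∈ rest
      · simp [h2, h3, hjy', hirange]
      · simp [h2, h3, hjy', hirange]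

theorem grids_eq (n : Nat) (gridA rowsB : List (List Char))
    (hwfA : vtWf n gridA) (hwfB : vtWf n rowsB)
    (hcell : ∀ j i : Nat, j < n → i < n → vtCellAt gridA j i = vtCellAt rowsB j i) :
    gridA = rowsB := by
  apply List.ext_getElem (by rw [hwfA.1, hwfB.1])
  intro j h1 h2
  have hj : j < n := by rw [hwfA.1] at h1; exact h1
  have hAr : gridA[j] ∈ gridA := List.getElem_mem h1
  have hBr : rowsB[j] ∈ rowsB := List.getElem_mem h2
  apply List.ext_getElem (by rw [hwfA.2 _ hAr, hwfB.2 _ hBr])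
  intro i hi1 hi2
  have hi : i < n := by rw [hwfA.2 _ hAr] at hi1; exact hi1
  have hrowA : gridA.getD j [] = gridA[j] := by
    rw [List.getD_eq_getElem?_getD, List.getElem?_eq_getElem h1, Option.getD_some]
  have hrowB : rowsB.getD j [] = rowsB[j] := by
    rw [List.getD_eq_getElem?_getD, List.getElem?_eq_getElem h2, Option.getD_some]
  have hA : gridA[j][i] = vtCellAt gridA j i := by
    unfold vtCellAt
    rw [hrowA, List.getD_eq_getElem?_getD, List.getElem?_eq_getElem hi1, Option.getD_some]
  have hB : rowsB[j][i] = vtCellAt rowsB j i := by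
    unfold vtCellAt
    rw [hrowB, List.getD_eq_getElem?_getD, List.getElem?_eq_getElem hi2, Option.getD_some]
  rw [hA, hB]
  exact hcell j i hj hi

-- ===== VERDICT (by name: the statement is the Claim_ definition above) =====
theorem visualize_terrain_spec : Claim_equal_visualize_terrain := by
  intro td g _hdom
  unfold Spec_visualize_terrain visualize_terrain visualize_terrain_alt
  dsimp only
  obtain ⟨hwf0, hrel0⟩ := grid0_spec g g.toNat rfl
  obtain ⟨hwfR0, hrelR0⟩ := rows0_spec g g.toNat rfl
  have hgood0 : vtGood (PySem.Dict.empty (κ := Int × Int) (ν := Char)) := by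
    intro k v h
    rw [PySem.Dict.get?_empty] at h
    cases h
  obtain ⟨hwf1, hrel1, hgood1⟩ := place_inv g g.toNat rfl td _ _ hwf0 hrel0 hgood0
  obtain ⟨hwfB, hrelB⟩ := splice_inv g g.toNat rfl td _ _ hwfR0 hrelR0
  obtain ⟨hwf2, hcell2⟩ := sweep_all g g.toNat rfl (PySem.List.pyRange 0 g 1) _
    (fun y hy => PySem.List.mem_pyRange_one.mp hy) hwf1
  have heq : _ = _ := grids_eq g.toNat _ _ hwf2 hwfB (by
    intro j i hj hi
    rw [hcell2 j i hj hi, if_pos (by rw [PySem.List.mem_pyRange_one]; omega),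
        hrel1 j i hj hi, hrelB j i hj hi]
    cases hd : (td.foldl (fun d e =>
          if 0 ≤ e.1 ∧ e.1 < g ∧ 0 ≤ e.2.1 ∧ e.2.1 < g then
            if e.2.2 = "full_cover" then d.insert (e.1, e.2.1) '#'
            else if e.2.2 = "half_cover" then d.insert (e.1, e.2.1) ':'
            else d
          else d) PySem.Dict.empty).get? ((i : Int), (j : Int)) with
    | some v =>
      rcases hgood1 _ _ hd with hv | hv <;> subst hv <;> simp [spawnFix]
    | none => simp [spawnFix, vtBgChar])
  rw [heq]
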